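-- pv_equiv track=rewrite | github.com/prasanna00019/Crypto-Toolkit-Scratch | HMAC/SHA_3.py | rc_bit
-- ===== SOURCE A (Python) =====
-- def rc_bit(t):
--     if t % 255 == 0:
--         return 1
--
--     R = ['1', '0', '0', '0', '0', '0', '0', '0']  # '10000000'
--
--     for i in range(1, t % 255 + 1):
--         R = ['0'] + R  # Prepend 0 to make it 9 bits
--
--         # XOR operations (bitwise xor with R[8])
--         R[0] = str(int(R[0]) ^ int(R[8]))
--         R[4] = str(int(R[4]) ^ int(R[8]))
--         R[5] = str(int(R[5]) ^ int(R[8]))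
--         R[6] = str(int(R[6]) ^ int(R[8]))
--
--         R = R[:8]  # Truncate to 8 bits
--
--     return int(R[0])
-- ===== SOURCE B (Python) =====
-- def rc_bit(t):
--     # rc(t) is the constant coefficient of x^(t mod 255) in GF(2)[x] modulo
--     # x^8 + x^6 + x^5 + x^4 + 1 (0x171): compute the power by square-and-multiply
--     # in GF(2^8) instead of stepping an LFSR t%255 times.
--     n = t % 255
--     if n == 0:
--         return 1
--     r, base, e = 1, 2, n          # base = x; all values fit in 8 bits
--     for _ in range(8):            # 8 bits suffice since e < 255
--         if e & 1:
--             r = _gf_mul(r, base)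
--         base = _gf_mul(base, base)
--         e >>= 1
--     return r & 1
--
--
-- def _gf_mul(a, b):
--     # carry-less (GF(2)) multiplication of two 8-bit values, reduced mod 0x171
--     p = 0
--     for _ in range(8):
--         if b & 1:
--             p ^= a
--         b >>= 1
--         a <<= 1
--         if a & 0x100:
--             a ^= 0x171
--     return p
-- ===== Notes on version B (the rewrite author's own statement) =====
-- stated objective: alternative
-- what changed: Computes rc(t) as the constant coefficient of x^(t mod 255) in GF(2)[x] mod x^8+x^6+x^5+x^4+1 via square-and-multiply (8 squarings/multiplies on 8-bit integers) instead of stepping A's string-list LFSR t%255 times.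
import Mathlib
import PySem

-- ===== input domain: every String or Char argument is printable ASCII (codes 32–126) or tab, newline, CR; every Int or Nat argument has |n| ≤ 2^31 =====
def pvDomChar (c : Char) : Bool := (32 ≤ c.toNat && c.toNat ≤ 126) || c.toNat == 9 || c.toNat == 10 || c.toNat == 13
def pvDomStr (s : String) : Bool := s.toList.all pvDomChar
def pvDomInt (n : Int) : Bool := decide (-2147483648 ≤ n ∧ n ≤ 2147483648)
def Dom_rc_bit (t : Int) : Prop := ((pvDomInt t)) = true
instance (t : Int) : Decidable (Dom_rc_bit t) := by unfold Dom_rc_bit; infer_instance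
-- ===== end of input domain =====

-- B computes rc(t) as the constant coefficient of x^(t mod 255) in GF(2^8)
-- (modulus 0x171) by square-and-multiply instead of stepping A's LFSR t%255 times.

-- ===== PORT A =====
-- int(s) for the register entries (always "0"/"1", so ofStr? is always some; .getD 0 only totalises)
def rcBitOf (s : String) : Int := (PySem.Int.ofStr? s).getD 0

def rc_bit (t : Int) : Int :=
  if PySem.Int.mod t 255 == 0 then 1
  else
    -- R = ['1','0','0','0','0','0','0','0']
    let R0 : List String := ["1", "0", "0", "0", "0", "0", "0", "0"]
    -- for i in range(1, t % 255 + 1)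
    let R := (PySem.List.pyRange 1 (PySem.Int.mod t 255 + 1) 1).foldl (fun R _ =>
      let R := "0" :: R                                   -- R = ['0'] + R  (9 entries)
      -- the four in-place updates; indices 0,4,5,6,8 are in range (length 9), getD/set are exact
      let R := R.set 0 (PySem.Int.toStr (Int.xor (rcBitOf (R.getD 0 "")) (rcBitOf (R.getD 8 ""))))
      let R := R.set 4 (PySem.Int.toStr (Int.xor (rcBitOf (R.getD 4 "")) (rcBitOf (R.getD 8 ""))))
      let R := R.set 5 (PySem.Int.toStr (Int.xor (rcBitOf (R.getD 5 "")) (rcBitOf (R.getD 8 ""))))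
      let R := R.set 6 (PySem.Int.toStr (Int.xor (rcBitOf (R.getD 6 "")) (rcBitOf (R.getD 8 ""))))
      R.take 8) R0                                        -- R = R[:8]
    rcBitOf (R.getD 0 "")                                 -- int(R[0]) (list nonempty, getD exact)

-- ===== PORT B =====
-- _gf_mul(a, b): carry-less multiply of two 8-bit values, reduced mod 0x171
def pvGfMul (a b : Int) : Int :=
  ((List.range 8).foldl (fun (s : Int × Int × Int) _ =>
    let p := s.1; let a := s.2.1; let b := s.2.2
    let p := if Int.land b 1 ≠ 0 then Int.xor p a else p   -- if b & 1: p ^= a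
    let b := Int.shiftRight b 1                             -- b >>= 1
    let a := Int.shiftLeft a 1                              -- a <<= 1
    let a := if Int.land a 0x100 ≠ 0 then Int.xor a 0x171 else a  -- if a & 0x100: a ^= 0x171
    (p, a, b)) (0, a, b)).1

def rc_bit_alt (t : Int) : Int :=
  let n := PySem.Int.mod t 255
  if n == 0 then 1
  else
    -- r, base, e = 1, 2, n; for _ in range(8): square-and-multiply
    let r := ((List.range 8).foldl (fun (s : Int × Int × Int) _ =>
      let r := s.1; let base := s.2.1; let e := s.2.2
      let r := if Int.land e 1 ≠ 0 then pvGfMul r base else r  -- if e & 1: r = _gf_mul(r, base)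
      let base := pvGfMul base base                            -- base = _gf_mul(base, base)
      let e := Int.shiftRight e 1                              -- e >>= 1
      (r, base, e)) (1, 2, n)).1
    Int.land r 1                                               -- return r & 1

-- ===== PRECONDITION & SPEC =====
def Spec_rc_bit (t : Int) (out : Int) : Prop := out = rc_bit_alt t
instance (t : Int) (out : Int) : Decidable (Spec_rc_bit t out) := by unfold Spec_rc_bit; infer_instance

-- ===== CLAIM (what is proved, stated in full; the proofs are below) =====
def Claim_equal_rc_bit : Prop := ∀ (t : Int), Dom_rc_bit t → Spec_rc_bit t (rc_bit t)

-- ===== LEMMAS AND PROOFS =====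
theorem rc_mod_mod (t : Int) :
    PySem.Int.mod (PySem.Int.mod t 255) 255 = PySem.Int.mod t 255 := by
  have h0 : (0:Int) < 255 := by norm_num
  have := PySem.Int.mod_nonneg (a := t) h0
  have := PySem.Int.mod_lt (a := t) h0
  rw [PySem.Int.mod_eq_emod_of_pos h0]
  omega

theorem rc_bit_factor (t : Int) : rc_bit t = rc_bit (PySem.Int.mod t 255) := by
  conv_rhs => rw [rc_bit, rc_mod_mod]
  rw [rc_bit]

theorem rc_bit_alt_factor (t : Int) : rc_bit_alt t = rc_bit_alt (PySem.Int.mod t 255) := by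
  conv_rhs => rw [rc_bit_alt, rc_mod_mod]
  rw [rc_bit_alt]

set_option maxHeartbeats 4000000 in
set_option maxRecDepth 100000 in
theorem rc_key : ∀ m : Fin 255, rc_bit (m : Int) = rc_bit_alt (m : Int) := by decide

-- ===== VERDICT (by name: the statement is the Claim_ definition above) =====
theorem rc_bit_spec : Claim_equal_rc_bit := by
  intro t _
  show rc_bit t = rc_bit_alt t
  have h0 : (0:Int) < 255 := by norm_num
  have hnn := PySem.Int.mod_nonneg (a := t) h0
  have hlt := PySem.Int.mod_lt (a := t) h0
  set m := PySem.Int.mod t 255 with hm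
  have hk : ((⟨m.toNat, by omega⟩ : Fin 255) : Int) = m := by
    simp [Int.toNat_of_nonneg hnn]
  calc rc_bit t = rc_bit m := rc_bit_factor t
    _ = rc_bit_alt m := by rw [← hk]; exact rc_key _
    _ = rc_bit_alt t := (rc_bit_alt_factor t).symm
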